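-- pv_equiv track=rewrite | github.com/ASSERT-KTH/Mokav | experiments/pynguin/c4b/return-lst/generated_tests/src_1749/1/src_1749.py | func
-- ===== SOURCE A (Python) =====
-- def func(*args):
-- 	ret_values = []
--
-- 	k = set([((i * (i + 1)) // 2) for i in range(1, 45000)])
-- 	n = int(args[0])
-- 	f = set([(n - i) for i in k])
-- 	t = (k & f)
-- 	if t:
-- 	    ret_values.append('YES')
-- 	else:
-- 	    ret_values.append('NO')
--
-- 	return ret_values
-- ===== SOURCE B (Python) =====
-- def func(*args):
--     n = int(args[0])
--     seen = set()
--     for i in range(1, 45000):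
--         t = i * (i + 1) // 2
--         seen.add(t)
--         if n - t in seen:
--             return ['YES']
--     return ['NO']
-- ===== Notes on version B (the rewrite author's own statement) =====
-- stated objective: alternative
-- what changed: Replaced A's construction of two full fixed-size sets (all candidate triangular numbers and all n-minus-triangular values) plus a set intersection by a single pass that grows one seen-set of triangular numbers and returns YES as soon as n minus the current triangular number is already seen (early exit; often faster in practice, but not consistently 1.5x at the largest timed size).
import Mathlib
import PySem

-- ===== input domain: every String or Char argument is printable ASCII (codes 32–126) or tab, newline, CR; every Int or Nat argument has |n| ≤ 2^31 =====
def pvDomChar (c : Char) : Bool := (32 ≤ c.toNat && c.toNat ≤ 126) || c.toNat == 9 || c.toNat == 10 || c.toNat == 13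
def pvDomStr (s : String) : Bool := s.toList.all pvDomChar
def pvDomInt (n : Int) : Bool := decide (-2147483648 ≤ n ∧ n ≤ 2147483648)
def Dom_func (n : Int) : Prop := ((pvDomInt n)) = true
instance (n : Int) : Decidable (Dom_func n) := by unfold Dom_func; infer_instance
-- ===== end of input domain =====

-- B replaces A's two full fixed-size sets and their intersection by a single pass that keeps
-- one growing set of triangular numbers and exits early on the first hit (alternative
-- single-pass decomposition; same worst-case cost). Python's `set` is ported as Std.HashSet (exact here: both programs
-- observe their sets only through membership / nonemptiness, never through iteration order;
-- PySem.Set, a list, has a quadratic build that cannot be evaluated at this fixed size).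

-- ===== PORT A =====
def func (n : Int) : List String :=
  let retValues : List String := []
  let k : Std.HashSet Int :=
    ((PySem.List.pyRange 1 45000).map (fun i => PySem.Int.floordiv (i * (i + 1)) 2)).foldl
      (fun s x => s.insert x) ∅
  let f : Std.HashSet Int :=
    (k.toList.map (fun i => n - i)).foldl (fun s x => s.insert x) ∅
  -- 'k & f': the elements of k that are also in f (consumed only through truthiness below)
  let t : List Int := k.toList.filter (fun x => f.contains x)
  if t ≠ [] then retValues ++ ["YES"] else retValues ++ ["NO"]

-- ===== PORT B =====
def funcAltLoop (n : Int) (l : List Int) (seen : Std.HashSet Int) : List String :=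
  match l with
  | [] => ["NO"]
  | i :: rest =>
      let t := PySem.Int.floordiv (i * (i + 1)) 2
      let seen' := seen.insert t
      if (n - t) ∈ seen' then ["YES"] else funcAltLoop n rest seen'

def func_alt (n : Int) : List String :=
  funcAltLoop n (PySem.List.pyRange 1 45000) ∅

-- ===== PRECONDITION & SPEC =====
def Spec_func (n : Int) (out : List String) : Prop := out = func_alt n
instance (n : Int) (out : List String) : Decidable (Spec_func n out) := by unfold Spec_func; infer_instance

-- ===== CLAIM (what is proved, stated in full; the proofs are below) =====
def Claim_equal_func : Prop := ∀ (n : Int), Dom_func n → Spec_func n (func n)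

-- ===== LEMMAS AND PROOFS =====

-- abbreviation used only in the proofs
def tri (i : Int) : Int := PySem.Int.floordiv (i * (i + 1)) 2

lemma mem_foldl_insert (l : List Int) (s : Std.HashSet Int) (x : Int) :
    x ∈ l.foldl (fun s y => s.insert y) s ↔ x ∈ s ∨ x ∈ l := by
  induction l generalizing s with
  | nil => simp
  | cons a rest ih =>
    rw [List.foldl_cons, ih]
    simp [Std.HashSet.mem_insert]
    tauto

-- A returns "YES" exactly when two triangular numbers (indices in [1,45000)) sum to n
lemma funcA_yes_iff (n : Int) :
    func n = ["YES"] ↔ ∃ a b : Int, 1 ≤ a ∧ a < 45000 ∧ 1 ≤ b ∧ b < 45000 ∧ tri a = n - tri b := by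
  unfold func
  have hk : ∀ x : Int,
      (x ∈ ((PySem.List.pyRange 1 45000).map (fun i => PySem.Int.floordiv (i * (i + 1)) 2)).foldl
        (fun s y => s.insert y) (∅ : Std.HashSet Int)) ↔
      ∃ a : Int, 1 ≤ a ∧ a < 45000 ∧ x = tri a := by
    intro x
    rw [mem_foldl_insert]
    simp only [Std.HashSet.not_mem_empty, false_or, List.mem_map, PySem.List.mem_pyRange_one]
    constructor
    · rintro ⟨a, ⟨h1, h2⟩, rfl⟩; exact ⟨a, h1, h2, rfl⟩
    · rintro ⟨a, h1, h2, rfl⟩; exact ⟨a, ⟨h1, h2⟩, rfl⟩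
  constructor
  · intro h
    by_cases hne :
        (((PySem.List.pyRange 1 45000).map (fun i => PySem.Int.floordiv (i * (i + 1)) 2)).foldl
          (fun s x => s.insert x) (∅ : Std.HashSet Int)).toList.filter
          (fun x =>
            ((((PySem.List.pyRange 1 45000).map (fun i => PySem.Int.floordiv (i * (i + 1)) 2)).foldl
              (fun s x => s.insert x) (∅ : Std.HashSet Int)).toList.map (fun i => n - i)).foldl
              (fun s x => s.insert x) (∅ : Std.HashSet Int) |>.contains x) ≠ []
    · obtain ⟨x, hxk, hxf⟩ := by
        have := hne
        rw [ne_eq, List.filter_eq_nil_iff] at this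
        push Not at this
        exact this
      rw [Std.HashSet.mem_toList, hk] at hxk
      obtain ⟨a, ha1, ha2, rfl⟩ := hxk
      rw [Std.HashSet.contains_iff_mem, mem_foldl_insert] at hxf
      simp only [Std.HashSet.not_mem_empty, false_or, List.mem_map, Std.HashSet.mem_toList] at hxf
      obtain ⟨y, hy, hxy⟩ := hxf
      rw [hk] at hy
      obtain ⟨b, hb1, hb2, rfl⟩ := hy
      exact ⟨a, b, ha1, ha2, hb1, hb2, hxy.symm⟩
    · simp only [hne, if_false] at h
      simp at h
  · rintro ⟨a, b, ha1, ha2, hb1, hb2, hab⟩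
    rw [if_pos]
    · rfl
    · rw [ne_eq, List.filter_eq_nil_iff]
      push Not
      refine ⟨tri a, ?_, ?_⟩
      · rw [Std.HashSet.mem_toList, hk]; exact ⟨a, ha1, ha2, rfl⟩
      · rw [Std.HashSet.contains_iff_mem, mem_foldl_insert]
        right
        simp only [List.mem_map, Std.HashSet.mem_toList]
        refine ⟨tri b, ?_, ?_⟩
        · rw [hk]; exact ⟨b, hb1, hb2, rfl⟩
        · linarith

lemma ite_yes_no (c : Prop) [Decidable c] :
    (if c then ([] : List String) ++ ["YES"] else [] ++ ["NO"]) = ["YES"] ∨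
    (if c then ([] : List String) ++ ["YES"] else [] ++ ["NO"]) = ["NO"] := by
  split <;> simp

lemma funcA_cases (n : Int) : func n = ["YES"] ∨ func n = ["NO"] := by
  unfold func
  exact ite_yes_no _

lemma loopB_cases (n : Int) (l : List Int) (s : Std.HashSet Int) :
    funcAltLoop n l s = ["YES"] ∨ funcAltLoop n l s = ["NO"] := by
  induction l generalizing s with
  | nil => right; rfl
  | cons i rest ih =>
    rw [funcAltLoop]
    split
    · left; rfl
    · exact ih _

-- characterisation of B's loop on a range starting at a
lemma loopB_yes_iff (n : Int) : ∀ (k : Nat) (a : Int) (s : Std.HashSet Int), (45000 - a).toNat = k →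
    (funcAltLoop n (PySem.List.pyRange a 45000) s = ["YES"] ↔
      ∃ j : Int, a ≤ j ∧ j < 45000 ∧
        ((n - tri j) ∈ s ∨ ∃ i : Int, a ≤ i ∧ i ≤ j ∧ n - tri j = tri i)) := by
  intro k
  induction k with
  | zero =>
    intro a s hk
    have hba : (45000 : Int) ≤ a := by omega
    rw [PySem.List.pyRange_one_eq_nil hba]
    rw [funcAltLoop]
    constructor
    · intro h; simp at h
    · rintro ⟨j, hj1, hj2, _⟩; omega
  | succ k ih =>
    intro a s hk
    have hab : a < 45000 := by omega
    rw [PySem.List.pyRange_one_cons hab, funcAltLoop]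
    by_cases hc : (n - PySem.Int.floordiv (a * (a + 1)) 2) ∈ s.insert (PySem.Int.floordiv (a * (a + 1)) 2)
    · rw [if_pos hc]
      rw [Std.HashSet.mem_insert] at hc
      simp only [beq_iff_eq] at hc
      constructor
      · intro _
        rcases hc with hc | hc
        · exact ⟨a, le_refl a, hab, Or.inr ⟨a, le_refl a, le_refl a, hc.symm⟩⟩
        · exact ⟨a, le_refl a, hab, Or.inl hc⟩
      · intro _; rfl
    · rw [if_neg hc]
      rw [ih (a + 1) _ (by omega)]
      rw [Std.HashSet.mem_insert] at hc
      simp only [beq_iff_eq] at hc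
      push Not at hc
      constructor
      · rintro ⟨j, hj1, hj2, hP⟩
        refine ⟨j, by omega, hj2, ?_⟩
        rcases hP with hP | ⟨i, hi1, hi2, hie⟩
        · rw [Std.HashSet.mem_insert] at hP
          simp only [beq_iff_eq] at hP
          rcases hP with hP | hP
          · exact Or.inr ⟨a, le_refl a, by omega, hP.symm⟩
          · exact Or.inl hP
        · exact Or.inr ⟨i, by omega, hi2, hie⟩
      · rintro ⟨j, hj1, hj2, hP⟩
        have hja : j ≠ a := by
          intro rfl_eq
          subst rfl_eq
          rcases hP with hP | ⟨i, hi1, hi2, hie⟩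
          · exact hc.2 hP
          · have : i = j := by omega
            subst this
            exact hc.1 hie.symm
        refine ⟨j, by omega, hj2, ?_⟩
        rcases hP with hP | ⟨i, hi1, hi2, hie⟩
        · exact Or.inl (by rw [Std.HashSet.mem_insert]; simp only [beq_iff_eq]; exact Or.inr hP)
        · by_cases hia : i = a
          · subst hia
            exact Or.inl (by rw [Std.HashSet.mem_insert]; simp only [beq_iff_eq]; exact Or.inl hie.symm)
          · exact Or.inr ⟨i, by omega, hi2, hie⟩

lemma funcB_yes_iff (n : Int) :
    func_alt n = ["YES"] ↔ ∃ a b : Int, 1 ≤ a ∧ a < 45000 ∧ 1 ≤ b ∧ b < 45000 ∧ tri a = n - tri b := by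
  unfold func_alt
  rw [loopB_yes_iff n 44999 1 ∅ (by decide)]
  constructor
  · rintro ⟨j, hj1, hj2, hP⟩
    rcases hP with hP | ⟨i, hi1, hi2, hie⟩
    · simp at hP
    · exact ⟨i, j, hi1, by omega, hj1, hj2, hie.symm⟩
  · rintro ⟨a, b, ha1, ha2, hb1, hb2, hab⟩
    by_cases hle : a ≤ b
    · exact ⟨b, hb1, hb2, Or.inr ⟨a, ha1, hle, by omega⟩⟩
    · exact ⟨a, ha1, ha2, Or.inr ⟨b, hb1, by omega, by omega⟩⟩

-- ===== VERDICT (by name: the statement is the Claim_ definition above) =====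
theorem func_spec : Claim_equal_func := by
  intro n _
  unfold Spec_func
  have hA := funcA_cases n
  have hB : func_alt n = ["YES"] ∨ func_alt n = ["NO"] :=
    loopB_cases n (PySem.List.pyRange 1 45000) ∅
  have hiff : func n = ["YES"] ↔ func_alt n = ["YES"] := by
    rw [funcA_yes_iff, funcB_yes_iff]
  rcases hA with hA | hA <;> rcases hB with hB | hB <;> simp_all
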